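-- pv_equiv track=rewrite | github.com/Prekzursil/env-inspector | env_inspector_gui/models.py | select_theme_name
-- ===== SOURCE A (Python) =====
-- from typing import Any, Callable, Dict, Iterable, List, Mapping, Sequence
--
-- def select_theme_name(os_name: str, themes: Sequence[str]) -> str | None:
--     theme_set = set(themes)
--     if os_name == "nt":
--         for preferred in ("vista", "xpnative"):
--             if preferred in theme_set:
--                 return preferred
--         if "clam" in theme_set:
--             return "clam"
--         return None
--     if "clam" in theme_set:
--         return "clam"
--     return None
-- ===== SOURCE B (Python) =====
-- def select_theme_name(os_name, themes):
--     priority = ["vista", "xpnative", "clam"] if os_name == "nt" else ["clam"]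
--     best = None
--     for t in themes:
--         if t in priority:
--             i = priority.index(t)
--             if best is None or i < best:
--                 best = i
--     return None if best is None else priority[best]
-- ===== Notes on version B (the rewrite author's own statement) =====
-- stated objective: alternative
-- what changed: A scans the fixed candidates and tests membership in a set built from the themes; B makes a single pass over the themes tracking the minimal priority rank seen and maps the rank back to its name, building no set at all.
import Mathlib
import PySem

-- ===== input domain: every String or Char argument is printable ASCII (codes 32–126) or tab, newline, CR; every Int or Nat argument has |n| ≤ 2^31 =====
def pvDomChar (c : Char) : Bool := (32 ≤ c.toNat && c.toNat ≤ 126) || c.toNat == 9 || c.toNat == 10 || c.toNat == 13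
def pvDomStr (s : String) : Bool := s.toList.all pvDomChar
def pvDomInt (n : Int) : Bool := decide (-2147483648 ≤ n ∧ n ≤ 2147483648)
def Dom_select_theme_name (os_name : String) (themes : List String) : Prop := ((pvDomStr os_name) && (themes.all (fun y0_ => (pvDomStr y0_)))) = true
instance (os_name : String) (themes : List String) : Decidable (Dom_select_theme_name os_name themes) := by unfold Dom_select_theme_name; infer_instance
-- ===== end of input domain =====

-- B replaces A's candidate-scan-with-set-membership by a single pass over the themes that
-- tracks the minimal priority rank seen, mapping the rank back to a name at the end (objective: alternative).
-- ===== PORT A =====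
-- for preferred in ("vista","xpnative"): if preferred in theme_set: return preferred
def selectLoopA (theme_set : PySem.Set String) : List String → Option String
  | [] => none
  | preferred :: rest =>
      if theme_set.contains preferred then some preferred else selectLoopA theme_set rest

def select_theme_name (os_name : String) (themes : List String) : Option String :=
  let theme_set := PySem.Set.ofList themes
  if os_name == "nt" then
    match selectLoopA theme_set ["vista", "xpnative"] with
    | some preferred => some preferred
    | none =>
        if theme_set.contains "clam" then some "clam" else none
  else
    if theme_set.contains "clam" then some "clam" else none

-- ===== PORT B =====
-- for t in themes: if t in priority: i = priority.index(t); if best is None or i < best: best = i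
-- (priority.index(t) is guarded by 't in priority', so List.idxOf is exact there)
def selectLoopB (priority : List String) : List String → Option Nat → Option Nat
  | [], best => best
  | t :: rest, best =>
      let best' :=
        if priority.contains t then
          let i := priority.idxOf t
          match best with
          | none => some i
          | some b => if i < b then some i else some b
        else best
      selectLoopB priority rest best'

def select_theme_name_alt (os_name : String) (themes : List String) : Option String :=
  let priority := if os_name == "nt" then ["vista", "xpnative", "clam"] else ["clam"]
  match selectLoopB priority themes none with
  | none => none
  | some b => priority[b]?  -- Python 'priority[best]' always in range here

-- ===== PRECONDITION & SPEC =====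
def Spec_select_theme_name (os_name : String) (themes : List String) (out : Option String) : Prop := out = select_theme_name_alt os_name themes
instance (os_name : String) (themes : List String) (out : Option String) : Decidable (Spec_select_theme_name os_name themes out) := by unfold Spec_select_theme_name; infer_instance

-- ===== CLAIM (what is proved, stated in full; the proofs are below) =====
def Claim_equal_select_theme_name : Prop := ∀ (os_name : String) (themes : List String), Dom_select_theme_name os_name themes → Spec_select_theme_name os_name themes (select_theme_name os_name themes)

-- ===== LEMMAS AND PROOFS =====

-- the "min" that selectLoopB's accumulator update performs
def minO : Option Nat → Option Nat → Option Nat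
  | none, y => y
  | some b, none => some b
  | some b, some i => if i < b then some i else some b

theorem minO_some_some (b i : Nat) : minO (some b) (some i) = some (min b i) := by
  show (if i < b then some i else some b) = some (min b i)
  split_ifs with h <;> congr 1 <;> omega

theorem minO_none_right (a : Option Nat) : minO a none = a := by cases a <;> rfl

theorem minO_assoc (a b c : Option Nat) : minO (minO a b) c = minO a (minO b c) := by
  cases a with
  | none => rfl
  | some a' =>
    cases b with
    | none => rfl
    | some b' =>
      cases c with
      | none => rw [minO_none_right, minO_none_right]
      | some c' => simp only [minO_some_some, Nat.min_assoc]

theorem selectLoopB_minO (P ts : List String) (best : Option Nat) :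
    selectLoopB P ts best = minO best (selectLoopB P ts none) := by
  induction ts generalizing best with
  | nil => cases best <;> simp [selectLoopB, minO]
  | cons t rest ih =>
      simp only [selectLoopB]
      by_cases h : P.contains t
      · simp only [h, if_true]
        rw [ih, ih (best := match none with | none => some (P.idxOf t) | some b => if P.idxOf t < b then some (P.idxOf t) else some b)]
        have : (match best with | none => some (P.idxOf t) | some b => if P.idxOf t < b then some (P.idxOf t) else some b)
            = minO best (some (P.idxOf t)) := by cases best <;> rfl
        rw [this, minO_assoc]
      · simp only [h, Bool.false_eq_true, if_false]
        exact ih best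

-- characterisation of B's loop for the nt priority list
theorem selectLoopB_nt (ts : List String) :
    selectLoopB ["vista", "xpnative", "clam"] ts none =
      (if "vista" ∈ ts then some 0 else if "xpnative" ∈ ts then some 1
       else if "clam" ∈ ts then some 2 else none) := by
  induction ts with
  | nil => simp [selectLoopB]
  | cons t rest ih =>
      rw [show selectLoopB ["vista","xpnative","clam"] (t :: rest) none
            = selectLoopB ["vista","xpnative","clam"] rest
                (if ["vista","xpnative","clam"].contains t then
                   some (["vista","xpnative","clam"].idxOf t) else none) from rfl]
      rw [selectLoopB_minO, ih]
      by_cases h1 : t = "vista"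
      · subst h1
        rw [show ((["vista","xpnative","clam"] : List String).contains "vista") = true from by decide,
            show ((["vista","xpnative","clam"] : List String).idxOf "vista") = 0 from by decide]
        simp only [if_true, List.mem_cons, true_or]
        split_ifs <;> simp [minO]
      · by_cases h2 : t = "xpnative"
        · subst h2
          rw [show ((["vista","xpnative","clam"] : List String).contains "xpnative") = true from by decide,
              show ((["vista","xpnative","clam"] : List String).idxOf "xpnative") = 1 from by decide]
          have g1 : ¬ ("vista" = "xpnative") := by decide
          simp only [if_true, List.mem_cons, g1, false_or, true_or]
          split_ifs <;> simp [minO]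
        · by_cases h3 : t = "clam"
          · subst h3
            rw [show ((["vista","xpnative","clam"] : List String).contains "clam") = true from by decide,
                show ((["vista","xpnative","clam"] : List String).idxOf "clam") = 2 from by decide]
            have g1 : ¬ ("vista" = "clam") := by decide
            have g2 : ¬ ("xpnative" = "clam") := by decide
            simp only [if_true, List.mem_cons, g1, g2, false_or, true_or]
            split_ifs <;> simp [minO]
          · have hc : ((["vista","xpnative","clam"] : List String).contains t) = false := by
              simp [List.contains_eq_mem, h1, h2, h3]
            have g1 : ¬ ("vista" = t) := fun e => h1 e.symm
            have g2 : ¬ ("xpnative" = t) := fun e => h2 e.symm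
            have g3 : ¬ ("clam" = t) := fun e => h3 e.symm
            simp only [hc, Bool.false_eq_true, if_false, List.mem_cons, g1, g2, g3, false_or]
            split_ifs <;> simp [minO]

-- characterisation of B's loop for the non-nt priority list
theorem selectLoopB_other (ts : List String) :
    selectLoopB ["clam"] ts none = (if "clam" ∈ ts then some 0 else none) := by
  induction ts with
  | nil => simp [selectLoopB]
  | cons t rest ih =>
      rw [show selectLoopB ["clam"] (t :: rest) none
            = selectLoopB ["clam"] rest
                (if ["clam"].contains t then some (["clam"].idxOf t) else none) from rfl]
      rw [selectLoopB_minO, ih]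
      by_cases h : t = "clam"
      · subst h
        rw [show ((["clam"] : List String).contains "clam") = true from by decide,
            show ((["clam"] : List String).idxOf "clam") = 0 from by decide]
        simp only [if_true, List.mem_cons, true_or]
        split_ifs <;> simp [minO]
      · have hc : ((["clam"] : List String).contains t) = false := by
          simp [List.contains_eq_mem, h]
        have g : ¬ ("clam" = t) := fun e => h e.symm
        simp only [hc, Bool.false_eq_true, if_false, List.mem_cons, g, false_or]
        split_ifs <;> simp [minO]

-- ===== VERDICT (by name: the statement is the Claim_ definition above) =====
theorem select_theme_name_spec : Claim_equal_select_theme_name := by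
  intro os_name themes _
  unfold Spec_select_theme_name select_theme_name select_theme_name_alt
  simp only [beq_iff_eq]
  by_cases h : os_name = "nt"
  · simp only [if_pos h]
    rw [selectLoopB_nt]
    by_cases hv : "vista" ∈ themes <;> by_cases hx : "xpnative" ∈ themes <;>
      by_cases hcl : "clam" ∈ themes <;>
      simp [hv, hx, hcl, selectLoopA, PySem.Set.mem_ofList]
  · simp only [if_neg h]
    rw [selectLoopB_other]
    by_cases hcl : "clam" ∈ themes <;>
      simp [hcl, PySem.Set.mem_ofList]
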